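-- pv_equiv track=rewrite | github.com/basmalanasser/tasks | task9(prob1).py | min_removals_to_equal_frequency
-- ===== SOURCE A (Python) =====
-- from collections import Counter
--
-- def min_removals_to_equal_frequency(s):
--     char_count=Counter(s)
--     freqs=list(char_count.values())
--     freq_counter=Counter(freqs)
--     min_removals=float('inf')
--     for target_freq in freq_counter:
--         removals=0
--         for freq,count in freq_counter.items():
--             if freq>target_freq:
--                 removals+=(freq-target_freq)*count
--
--             elif freq<target_freq:
--                 removals+=freq*count
--
--         min_removals=min(min_removals,removals)
--     return min_removals
-- ===== SOURCE B (Python) =====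
-- from collections import Counter
--
-- def min_removals_to_equal_frequency(s):
--     freq_counter = Counter(Counter(s).values())
--     pairs = sorted(freq_counter.items(), key=lambda p: p[0])
--     total_cost = sum(f * c for f, c in pairs)
--     total_cnt = sum(c for f, c in pairs)
--     best = None
--     pref_cost = 0
--     pref_cnt = 0
--     for f, c in pairs:
--         suf_cost = total_cost - pref_cost - f * c
--         suf_cnt = total_cnt - pref_cnt - c
--         cand = pref_cost + (suf_cost - f * suf_cnt)
--         if best is None or cand < best:
--             best = cand
--         pref_cost += f * c
--         pref_cnt += c
--     return best
-- ===== Notes on version B (the rewrite author's own statement) =====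
-- stated objective: alternative
-- what changed: Replaces the quadratic double loop over the frequency counter by sort-the-distinct-frequencies plus running prefix sums, evaluating each target's removal cost in O(1) instead of an inner scan.
-- outside the precondition, e.g. on min_removals_to_equal_frequency(''): A returns inf, B returns None
import Mathlib
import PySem

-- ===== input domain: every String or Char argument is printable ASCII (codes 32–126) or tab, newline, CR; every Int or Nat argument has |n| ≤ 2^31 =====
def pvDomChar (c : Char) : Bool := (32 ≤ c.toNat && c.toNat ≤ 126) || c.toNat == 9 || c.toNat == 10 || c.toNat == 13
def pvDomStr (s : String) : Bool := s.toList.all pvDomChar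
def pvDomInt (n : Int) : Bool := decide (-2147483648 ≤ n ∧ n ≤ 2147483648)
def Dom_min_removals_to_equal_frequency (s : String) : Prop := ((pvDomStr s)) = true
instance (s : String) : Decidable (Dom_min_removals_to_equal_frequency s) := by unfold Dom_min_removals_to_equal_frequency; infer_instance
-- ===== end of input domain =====

-- B replaces A's quadratic double loop over the frequency counter by sorting the distinct
-- frequencies and sweeping once with running prefix sums (each target costed in O(1)).

-- ===== PORT A =====
-- literal transliteration of Source A; the Option Int accumulator is Python's float infinity start:
-- none plays infinity, and min(infinity, x) = x.  The final .getD 0 is only reached for s = "" (excluded by Pre_).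
def min_removals_to_equal_frequency (s : String) : Int :=
  let char_count := PySem.Dict.counter s.toList
  let freqs := char_count.values
  let freq_counter := PySem.Dict.counter freqs
  let res := freq_counter.keys.foldl (fun (mn : Option Int) target =>
      let removals := freq_counter.items.foldl (fun (r : Int) (p : Int × Int) =>
          if p.1 > target then r + (p.1 - target) * p.2
          else if p.1 < target then r + p.1 * p.2
          else r) 0
      some (match mn with | none => removals | some m => min m removals)) none
  res.getD 0

-- ===== PORT B =====
-- literal transliteration of Source B (best = none plays Python's None)
def min_removals_to_equal_frequency_alt (s : String) : Int :=
  let freq_counter := PySem.Dict.counter (PySem.Dict.counter s.toList).values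
  let pairs := PySem.List.sorted freq_counter.items (fun p => p.1) false
  let total_cost := (pairs.map (fun p => p.1 * p.2)).sum
  let total_cnt := (pairs.map (fun p => p.2)).sum
  let st := pairs.foldl (fun (st : Option Int × Int × Int) p =>
      let suf_cost := total_cost - st.2.1 - p.1 * p.2
      let suf_cnt := total_cnt - st.2.2 - p.2
      let cand := st.2.1 + (suf_cost - p.1 * suf_cnt)
      let best := match st.1 with
        | none => some cand
        | some b => if cand < b then some cand else some b
      (best, st.2.1 + p.1 * p.2, st.2.2 + p.2)) (none, 0, 0)
  st.1.getD 0

-- ===== PRECONDITION & SPEC =====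
-- Pre_ excludes only the empty string, on which A returns the float infinity — not a value of
-- the declared Int type (B returns None there).
def Pre_min_removals_to_equal_frequency (s : String) : Prop := s ≠ ""
instance (s : String) : Decidable (Pre_min_removals_to_equal_frequency s) := by unfold Pre_min_removals_to_equal_frequency; infer_instance
def pvWitness_min_removals_to_equal_frequency : String := "aab"

def Spec_min_removals_to_equal_frequency (s : String) (out : Int) : Prop := out = min_removals_to_equal_frequency_alt s
instance (s : String) (out : Int) : Decidable (Spec_min_removals_to_equal_frequency s out) := by unfold Spec_min_removals_to_equal_frequency; infer_instance

-- ===== CLAIM (what is proved, stated in full; the proofs are below) =====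
def Claim_equal_min_removals_to_equal_frequency : Prop := ∀ (s : String), Dom_min_removals_to_equal_frequency s → Pre_min_removals_to_equal_frequency s → Spec_min_removals_to_equal_frequency s (min_removals_to_equal_frequency s)

-- ===== LEMMAS AND PROOFS =====

-- removal cost of target t over an item list, as a sum
def pvRem (l : List (Int × Int)) (t : Int) : Int :=
  (l.map (fun p => if p.1 > t then (p.1 - t) * p.2 else if p.1 < t then p.1 * p.2 else 0)).sum

def pvMinStep (mn : Option Int) (v : Int) : Option Int :=
  some (match mn with | none => v | some m => min m v)

-- A's inner loop computes pvRem
theorem pvA_inner (l : List (Int × Int)) (t : Int) (a : Int) :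
    l.foldl (fun (r : Int) (p : Int × Int) =>
      if p.1 > t then r + (p.1 - t) * p.2
      else if p.1 < t then r + p.1 * p.2 else r) a = a + pvRem l t := by
  induction l generalizing a with
  | nil => simp [pvRem]
  | cons p l ih =>
    simp only [List.foldl_cons, pvRem, List.map_cons, List.sum_cons] at *
    split_ifs <;> rw [ih] <;> ring

-- running min fold is List.min?
theorem pvOptMin_aux (l : List Int) (m : Int) :
    l.foldl pvMinStep (some m) = some (l.foldl min m) := by
  induction l generalizing m with
  | nil => rfl
  | cons x l ih => simp [pvMinStep, ih]

theorem pvOptMin_eq_min? (l : List Int) : l.foldl pvMinStep none = l.min? := by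
  cases l with
  | nil => rfl
  | cons x l =>
    rw [List.min?_cons', List.foldl_cons]
    show l.foldl pvMinStep (pvMinStep none x) = _
    rw [show pvMinStep none x = some x from rfl, pvOptMin_aux]

theorem pvMin?_perm {l l' : List Int} (h : l.Perm l') : l.min? = l'.min? := by
  cases hl : l.min? with
  | none =>
    rw [List.min?_eq_none_iff] at hl
    subst hl
    rw [eq_comm, List.min?_eq_none_iff]
    exact h.nil_eq.symm
  | some a =>
    rw [List.min?_eq_some_iff] at hl
    rw [eq_comm, List.min?_eq_some_iff]
    exact ⟨h.subset hl.1, fun b hb => hl.2 b (h.symm.subset hb)⟩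

-- pvRem is permutation-invariant
theorem pvRem_perm {l l' : List (Int × Int)} (h : l.Perm l') (t : Int) :
    pvRem l t = pvRem l' t := by
  unfold pvRem
  exact List.Perm.sum_eq (h.map _)

-- Σ (f - t)*c over l = Σ f*c - t * Σ c
theorem pvSuf_sum (l : List (Int × Int)) (t : Int) :
    (l.map (fun p => (p.1 - t) * p.2)).sum
      = (l.map (fun p => p.1 * p.2)).sum - t * (l.map (fun p => p.2)).sum := by
  induction l with
  | nil => simp
  | cons p l ih => simp [ih]; ring

-- cost of a split list at its middle element, using sortedness
theorem pvRem_split (l1 l2 : List (Int × Int)) (p : Int × Int)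
    (h1 : ∀ q ∈ l1, q.1 < p.1) (h2 : ∀ q ∈ l2, p.1 < q.1) :
    pvRem (l1 ++ p :: l2) p.1
      = (l1.map (fun q => q.1 * q.2)).sum
        + ((l2.map (fun q => q.1 * q.2)).sum - p.1 * (l2.map (fun q => q.2)).sum) := by
  unfold pvRem
  rw [List.map_append, List.sum_append, List.map_cons, List.sum_cons]
  have e1 : l1.map (fun q => if q.1 > p.1 then (q.1 - p.1) * q.2 else if q.1 < p.1 then q.1 * q.2 else 0)
      = l1.map (fun q => q.1 * q.2) := by
    apply List.map_congr_left
    intro q hq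
    have := h1 q hq
    simp only [gt_iff_lt]
    rw [if_neg (by omega), if_pos this]
  have e2 : l2.map (fun q => if q.1 > p.1 then (q.1 - p.1) * q.2 else if q.1 < p.1 then q.1 * q.2 else 0)
      = l2.map (fun q => (q.1 - p.1) * q.2) := by
    apply List.map_congr_left
    intro q hq
    have := h2 q hq
    simp only [gt_iff_lt]
    rw [if_pos this]
  rw [e1, e2, pvSuf_sum]
  simp


-- B's branch update is pvMinStep
theorem pvStep_eq (mn : Option Int) (v : Int) :
    (match mn with | none => some v | some b => if v < b then some v else some b)
      = pvMinStep mn v := by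
  cases mn with
  | none => rfl
  | some b =>
    simp only [pvMinStep]
    rcases lt_or_ge v b with h | h
    · rw [if_pos h, min_eq_right h.le]
    · rw [if_neg (not_lt.mpr h), min_eq_left h]

-- B's sweep over the tail l2, with prefix sums of l1 in the state, computes the running min of pvRem
theorem pvB_fold (all l1 l2 : List (Int × Int)) (hsplit : all = l1 ++ l2)
    (hs : all.Pairwise (fun a b => a.1 < b.1)) (best : Option Int) :
    (l2.foldl (fun (st : Option Int × Int × Int) p =>
        ((match st.1 with
          | none => some (st.2.1 + (((all.map (fun p => p.1 * p.2)).sum - st.2.1 - p.1 * p.2)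
              - p.1 * ((all.map (fun p => p.2)).sum - st.2.2 - p.2)))
          | some b => if st.2.1 + (((all.map (fun p => p.1 * p.2)).sum - st.2.1 - p.1 * p.2)
              - p.1 * ((all.map (fun p => p.2)).sum - st.2.2 - p.2)) < b
              then some (st.2.1 + (((all.map (fun p => p.1 * p.2)).sum - st.2.1 - p.1 * p.2)
                - p.1 * ((all.map (fun p => p.2)).sum - st.2.2 - p.2)))
              else some b),
         st.2.1 + p.1 * p.2, st.2.2 + p.2))
      (best, (l1.map (fun p => p.1 * p.2)).sum, (l1.map (fun p => p.2)).sum)).1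
    = (l2.map (fun p => pvRem all p.1)).foldl pvMinStep best := by
  induction l2 generalizing l1 best with
  | nil => rfl
  | cons p l2 ih =>
    have hsplit' : all = (l1 ++ [p]) ++ l2 := by simp [hsplit]
    have hp : all.Pairwise (fun a b => a.1 < b.1) := hs
    rw [hsplit] at hp
    rw [List.pairwise_append] at hp
    have hcons := hp.2.1
    rw [List.pairwise_cons] at hcons
    have h1 : ∀ q ∈ l1, q.1 < p.1 := fun q hq => hp.2.2 q hq p (List.mem_cons_self)
    have h2 : ∀ q ∈ l2, p.1 < q.1 := hcons.1
    have hcand : (l1.map (fun p => p.1 * p.2)).sum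
        + (((all.map (fun p => p.1 * p.2)).sum - (l1.map (fun p => p.1 * p.2)).sum - p.1 * p.2)
          - p.1 * ((all.map (fun p => p.2)).sum - (l1.map (fun p => p.2)).sum - p.2))
        = pvRem all p.1 := by
      rw [hsplit, pvRem_split l1 l2 p h1 h2]
      simp only [List.map_append, List.sum_append, List.map_cons, List.sum_cons,
        List.map_nil, List.sum_nil]
      ring
    have e1 : (l1.map (fun p => p.1 * p.2)).sum + p.1 * p.2
        = ((l1 ++ [p]).map (fun p => p.1 * p.2)).sum := by simp
    have e2 : (l1.map (fun p => p.2)).sum + p.2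
        = ((l1 ++ [p]).map (fun p => p.2)).sum := by simp
    rw [List.foldl_cons, List.map_cons, List.foldl_cons]
    dsimp only
    rw [hcand, pvStep_eq, e1, e2]
    exact ih (l1 ++ [p]) hsplit' (pvMinStep best (pvRem all p.1))

-- pairs is strictly increasing in the frequency component
theorem pvPairs_strict (freqs : List Int) :
    (PySem.List.sorted (PySem.Dict.counter freqs).items (fun p => p.1) false).Pairwise
      (fun a b => a.1 < b.1) := by
  have hle := PySem.List.sorted_pairwise (xs := (PySem.Dict.counter freqs).items) (key := fun p => p.1)
  have hperm : (PySem.List.sorted (PySem.Dict.counter freqs).items (fun p => p.1) false).Perm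
      (PySem.Dict.counter freqs).items := PySem.List.sorted_perm _ _ _
  have hnodup : ((PySem.Dict.counter freqs).items.map Prod.fst).Nodup := by
    have := PySem.Dict.nodup_keys_counter (xs := freqs)
    simpa [PySem.Dict.keys] using this
  have hnodup2 : ((PySem.List.sorted (PySem.Dict.counter freqs).items (fun p => p.1) false).map Prod.fst).Nodup :=
    ((hperm.map Prod.fst).nodup_iff).mpr hnodup
  have hne : (PySem.List.sorted (PySem.Dict.counter freqs).items (fun p => p.1) false).Pairwise
      (fun a b => a.1 ≠ b.1) := List.pairwise_map.mp hnodup2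
  exact (hle.and hne).imp (fun h => lt_of_le_of_ne h.1 h.2)

-- ===== VERDICT (by name: the statement is the Claim_ definition above) =====
theorem min_removals_to_equal_frequency_spec : Claim_equal_min_removals_to_equal_frequency := by
  intro s _ _
  unfold Spec_min_removals_to_equal_frequency
  have hA : min_removals_to_equal_frequency s
      = (((PySem.Dict.counter (PySem.Dict.counter s.toList).values).keys.map
          (pvRem (PySem.Dict.counter (PySem.Dict.counter s.toList).values).items)).min?).getD 0 := by
    unfold min_removals_to_equal_frequency
    dsimp only
    rw [← pvOptMin_eq_min?, List.foldl_map]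
    congr 1
    apply PySem.List.foldl_congr_mem
    intro mn t _
    rw [pvA_inner, zero_add]
    cases mn <;> rfl
  have hB : min_removals_to_equal_frequency_alt s
      = (((PySem.List.sorted (PySem.Dict.counter (PySem.Dict.counter s.toList).values).items
            (fun p => p.1) false).map
          (fun p => pvRem (PySem.List.sorted
            (PySem.Dict.counter (PySem.Dict.counter s.toList).values).items (fun p => p.1) false)
            p.1)).min?).getD 0 := by
    unfold min_removals_to_equal_frequency_alt
    dsimp only
    rw [← pvOptMin_eq_min?]
    congr 1
    exact pvB_fold _ [] _ rfl (pvPairs_strict _) none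
  rw [hA, hB]
  congr 1
  apply pvMin?_perm
  have hperm : (PySem.List.sorted (PySem.Dict.counter (PySem.Dict.counter s.toList).values).items
      (fun p => p.1) false).Perm
      (PySem.Dict.counter (PySem.Dict.counter s.toList).values).items :=
    PySem.List.sorted_perm _ _ _
  have hmapeq : (PySem.List.sorted (PySem.Dict.counter (PySem.Dict.counter s.toList).values).items
        (fun p => p.1) false).map
      (fun p => pvRem (PySem.List.sorted
        (PySem.Dict.counter (PySem.Dict.counter s.toList).values).items (fun p => p.1) false) p.1)
      = ((PySem.List.sorted (PySem.Dict.counter (PySem.Dict.counter s.toList).values).items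
          (fun p => p.1) false).map (fun x => x.1)).map
        (pvRem (PySem.Dict.counter (PySem.Dict.counter s.toList).values).items) := by
    rw [List.map_map]
    exact List.map_congr_left (fun p _ => pvRem_perm hperm p.1)
  rw [hmapeq]
  exact ((hperm.map (fun x => x.1)).map _).symm
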